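-- pv_equiv track=rewrite | github.com/Engagendy/invo | invoice_processor.py | build_sheet_row_data
-- ===== SOURCE A (Python) =====
-- from typing import Any, Iterable, List, Optional, Sequence, Tuple
--
-- def build_sheet_row_data(values: Sequence[Any], header_map: dict[int, str]) -> dict[str, Any]:
--     row_data: dict[str, Any] = {}
--     for column_index, normalized in header_map.items():
--         value = values[column_index] if column_index < len(values) else ""
--         if normalized not in row_data:
--             row_data[normalized] = value
--             continue
--         existing = row_data.get(normalized)
--         if existing in (None, "") and value not in (None, ""):
--             row_data[normalized] = value
--     return row_data
-- ===== SOURCE B (Python) =====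
-- from typing import Any, Sequence
--
--
-- def build_sheet_row_data(values: Sequence[Any], header_map: dict[int, str]) -> dict[str, Any]:
--     # Pass 1: group the column values of each normalized header name, in first-occurrence order.
--     groups: dict[str, list] = {}
--     for column_index, normalized in header_map.items():
--         value = values[column_index] if column_index < len(values) else ""
--         groups.setdefault(normalized, []).append(value)
--     # Pass 2: each name resolves to its first non-blank value, else its first value.
--     return {
--         name: next((v for v in vals if v not in (None, "")), vals[0])
--         for name, vals in groups.items()
--     }
-- ===== Notes on version B (the rewrite author's own statement) =====
-- stated objective: alternative
-- what changed: Replaces A's inline conditional-overwrite merge with a two-pass index-then-resolve structure: first group all values per normalized name in a dict of lists, then resolve each name to its first non-blank value (falling back to the first value).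
import Mathlib
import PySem

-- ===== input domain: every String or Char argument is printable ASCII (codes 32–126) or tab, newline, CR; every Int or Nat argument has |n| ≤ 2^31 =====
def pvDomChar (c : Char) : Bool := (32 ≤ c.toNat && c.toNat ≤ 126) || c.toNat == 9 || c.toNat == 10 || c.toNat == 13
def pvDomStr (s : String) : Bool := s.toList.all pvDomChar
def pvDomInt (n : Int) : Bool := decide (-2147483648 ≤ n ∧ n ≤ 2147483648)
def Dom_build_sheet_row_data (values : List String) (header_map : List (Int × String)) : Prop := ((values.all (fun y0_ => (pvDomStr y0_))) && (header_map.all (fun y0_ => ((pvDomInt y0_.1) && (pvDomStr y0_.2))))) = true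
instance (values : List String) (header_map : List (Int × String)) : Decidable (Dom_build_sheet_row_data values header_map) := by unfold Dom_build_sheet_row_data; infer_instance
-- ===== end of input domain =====

-- B replaces A's inline first-non-blank merge with a two-pass group-then-resolve structure; same cost.
-- ===== PORT A =====
-- values[column_index] if column_index < len(values) else ""  (shared by both Pythons verbatim)
def pvVal (values : List String) (i : Int) : String :=
  if i < (values.length : Int) then PySem.List.pyGetD values i "" else ""

def build_sheet_row_data (values : List String) (header_map : List (Int × String)) : List (String × String) :=
  ((PySem.Dict.ofList header_map).items.foldl
    (fun (row : PySem.Dict String String) p =>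
      let value := pvVal values p.1
      if row.contains p.2 = false then row.insert p.2 value
      else if row.getD p.2 "" = "" ∧ value ≠ "" then row.insert p.2 value else row)
    PySem.Dict.empty).items

-- ===== PORT B =====
-- next((v for v in vals if v not in (None, "")), vals[0])
def pvResolve (vs : List String) : String :=
  (vs.find? (fun v => v != "")).getD (vs.headD "")

def build_sheet_row_data_alt (values : List String) (header_map : List (Int × String)) : List (String × String) :=
  let groups := (PySem.Dict.ofList header_map).items.foldl
    (fun (d : PySem.Dict String (List String)) p => d.modify p.2 [] (· ++ [pvVal values p.1]))
    PySem.Dict.empty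
  groups.items.map (fun q => (q.1, pvResolve q.2))

-- ===== PRECONDITION & SPEC =====
-- Pre_ excludes exactly the inputs where the Python A raises IndexError:
-- a header column index below -len(values) (negative indexing out of range).
def Pre_build_sheet_row_data (values : List String) (header_map : List (Int × String)) : Prop :=
  ∀ p ∈ header_map, -(values.length : Int) ≤ p.1
instance (values : List String) (header_map : List (Int × String)) : Decidable (Pre_build_sheet_row_data values header_map) := by unfold Pre_build_sheet_row_data; infer_instance

def pvWitness_build_sheet_row_data : List String × (List (Int × String)) :=
  (["a", ""], [(0, "x"), (1, "x"), (5, "y")])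

def Spec_build_sheet_row_data (values : List String) (header_map : List (Int × String)) (out : List (String × String)) : Prop := out = build_sheet_row_data_alt values header_map
instance (values : List String) (header_map : List (Int × String)) (out : List (String × String)) : Decidable (Spec_build_sheet_row_data values header_map out) := by unfold Spec_build_sheet_row_data; infer_instance

-- ===== CLAIM (what is proved, stated in full; the proofs are below) =====
def Claim_equal_build_sheet_row_data : Prop := ∀ (values : List String) (header_map : List (Int × String)), Dom_build_sheet_row_data values header_map → Pre_build_sheet_row_data values header_map → Spec_build_sheet_row_data values header_map (build_sheet_row_data values header_map)

-- ===== LEMMAS AND PROOFS =====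

lemma pvResolve_append (vs : List String) (v : String) (h : vs ≠ []) :
    pvResolve (vs ++ [v]) = if pvResolve vs = "" ∧ v ≠ "" then v else pvResolve vs := by
  unfold pvResolve
  rw [List.find?_append]
  cases hf : vs.find? (fun v => v != "") with
  | some w =>
    have hw : w ≠ "" := by simpa using List.find?_some hf
    simp [hw]
  | none =>
    obtain ⟨h0, t, rfl⟩ := List.exists_cons_of_ne_nil h
    have hall := List.find?_eq_none.mp hf
    have h00 : h0 = "" := by simpa using hall h0 (by simp)
    by_cases hv : v = ""
    · simp [h00, hv, List.find?]
    · have hvb : (v != "") = true := bne_iff_ne.mpr hv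
      simp [h00, hv, List.find?, hvb]

lemma pvResolve_singleton (v : String) : pvResolve [v] = v := by
  by_cases hv : v = ""
  · simp [pvResolve, hv, List.find?]
  · have hvb : (v != "") = true := bne_iff_ne.mpr hv
    simp [pvResolve, List.find?, hvb]

lemma pv_fold_inv (values : List String) (L : List (Int × String))
    (dG : PySem.Dict String (List String))
    (hnd : dG.keys.Nodup) (hne : ∀ q ∈ dG.items, q.2 ≠ []) :
    (L.foldl
      (fun (row : PySem.Dict String String) p =>
        let value := pvVal values p.1
        if row.contains p.2 = false then row.insert p.2 value
        else if row.getD p.2 "" = "" ∧ value ≠ "" then row.insert p.2 value else row)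
      (PySem.Dict.mk (dG.items.map (fun q => (q.1, pvResolve q.2))))).items
    = ((L.foldl
        (fun (d : PySem.Dict String (List String)) p => d.modify p.2 [] (· ++ [pvVal values p.1]))
        dG).items).map (fun q => (q.1, pvResolve q.2)) := by
  induction L generalizing dG with
  | nil => simp
  | cons hd rest ih =>
    obtain ⟨i, name⟩ := hd
    set v := pvVal values i with hv
    set f : (String × List String) → String × String := fun q => (q.1, pvResolve q.2) with hfdef
    set A := PySem.Dict.mk (dG.items.map f) with hA
    have hcomp : ((fun (p : String × String) => p.1 == name) ∘ f)
        = (fun (p : String × List String) => p.1 == name) := rfl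
    have hcont : A.contains name = dG.contains name := by
      simp only [hA, PySem.Dict.contains, List.any_map, hcomp]
    set dG' := dG.modify name [] (· ++ [v]) with hG'
    have hnd' : dG'.keys.Nodup := PySem.Dict.nodup_keys_insert _ _ _ hnd
    have hne' : ∀ q ∈ dG'.items, q.2 ≠ [] := by
      intro q hq
      rcases (PySem.Dict.mem_items_insert _ _ _ _).mp hq with h | h
      · subst h; simp
      · exact hne q h.1
    have key : (if A.contains name = false then A.insert name v
            else if A.getD name "" = "" ∧ v ≠ "" then A.insert name v else A)
         = PySem.Dict.mk (dG'.items.map f) := by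
      by_cases hc : dG.contains name = true
      · -- existing key
        have hfind : ∃ q, dG.items.find? (fun p => p.1 == name) = some q := by
          have : (dG.items.find? (fun p => p.1 == name)).isSome = true := by
            rw [List.find?_isSome]
            simpa [PySem.Dict.contains, List.any_eq_true] using hc
          exact Option.isSome_iff_exists.mp this
        obtain ⟨q, hq⟩ := hfind
        have hq1 : q.1 = name := by simpa using List.find?_some hq
        have hqmem : q ∈ dG.items := List.mem_of_find?_eq_some hq
        have hvs : dG.getD name [] = q.2 := by
          simp [PySem.Dict.getD, PySem.Dict.get?, hq]
        have hAget : A.getD name "" = pvResolve q.2 := by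
          simp only [PySem.Dict.getD, PySem.Dict.get?, hA, List.find?_map, hcomp, hq]
          rfl
        have hqne : q.2 ≠ [] := hne q hqmem
        have hres := pvResolve_append q.2 v hqne
        have hG'items : dG'.items = dG.items.map
            (fun p => if (p.1 == name) = true then (name, q.2 ++ [v]) else p) := by
          rw [hG']
          show (dG.insert name (dG.getD name [] ++ [v])).items = _
          rw [PySem.Dict.items_insert_of_contains _ _ hc, hvs]
        have hAc : ¬ (A.contains name = false) := by simp [hcont, hc]
        rw [if_neg hAc, hAget]
        by_cases hcond : pvResolve q.2 = "" ∧ v ≠ ""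
        · -- A overwrites with v; resolve (q.2 ++ [v]) = v
          have hres2 : pvResolve (q.2 ++ [v]) = v := by rw [hres, if_pos hcond]
          rw [if_pos hcond]
          have hitems : (A.insert name v).items = dG'.items.map f := by
            rw [PySem.Dict.items_insert_of_contains A v (by rw [hcont]; exact hc),
              hG'items, hA, List.map_map, List.map_map]
            apply List.map_congr_left
            intro p hp
            by_cases hpn : (p.1 == name) = true
            · simp [Function.comp, hpn, hfdef, hres2]
            · simp [Function.comp, hpn, hfdef]
          show PySem.Dict.mk ((A.insert name v).items) = _
          exact congrArg PySem.Dict.mk hitems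
        · -- A keeps its entry; the resolved value is unchanged
          have hres2 : pvResolve (q.2 ++ [v]) = pvResolve q.2 := by rw [hres, if_neg hcond]
          rw [if_neg hcond]
          have hitems : dG'.items.map f = dG.items.map f := by
            rw [hG'items, List.map_map]
            apply List.map_congr_left
            intro p hp
            by_cases hpn : (p.1 == name) = true
            · have hp1 : p.1 = q.1 := by rw [hq1]; exact eq_of_beq hpn
              have hpq : p = q := List.inj_on_of_nodup_map hnd hp hqmem hp1
              subst hpq
              simp [Function.comp, hfdef, hq1, hres2]
            · simp [Function.comp, hpn, hfdef]
          show PySem.Dict.mk (dG.items.map f) = PySem.Dict.mk (dG'.items.map f)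
          exact congrArg PySem.Dict.mk hitems.symm
      · -- new key: both append
        have hcf : dG.contains name = false := by simpa using hc
        have hAc : A.contains name = false := by rw [hcont]; exact hcf
        rw [if_pos hAc]
        have hG'items : dG'.items = dG.items ++ [(name, [v])] := by
          rw [hG']
          show (dG.insert name (dG.getD name [] ++ [v])).items = _
          rw [PySem.Dict.getD_of_not_contains _ _ hcf]
          rw [PySem.Dict.items_insert_of_not_contains _ _ hcf]
          rfl
        have hitems : (A.insert name v).items = dG'.items.map f := by
          rw [PySem.Dict.items_insert_of_not_contains _ _ hAc, hG'items, hA]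
          simp [hfdef, pvResolve_singleton]
        show PySem.Dict.mk ((A.insert name v).items) = _
        exact congrArg PySem.Dict.mk hitems
    show (rest.foldl
      (fun (row : PySem.Dict String String) p =>
        let value := pvVal values p.1
        if row.contains p.2 = false then row.insert p.2 value
        else if row.getD p.2 "" = "" ∧ value ≠ "" then row.insert p.2 value else row)
      (if A.contains name = false then A.insert name v
        else if A.getD name "" = "" ∧ v ≠ "" then A.insert name v else A)).items
    = ((rest.foldl
        (fun (d : PySem.Dict String (List String)) p => d.modify p.2 [] (· ++ [pvVal values p.1]))
        dG')).items.map f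
    rw [key]
    exact ih dG' hnd' hne'

-- ===== VERDICT (by name: the statement is the Claim_ definition above) =====
theorem build_sheet_row_data_spec : Claim_equal_build_sheet_row_data := by
  intro values header_map _ _
  unfold Spec_build_sheet_row_data build_sheet_row_data build_sheet_row_data_alt
  have := pv_fold_inv values (PySem.Dict.ofList header_map).items PySem.Dict.empty
    (by simp [pysem]) (by simp [pysem, PySem.Dict.empty])
  simpa [PySem.Dict.empty] using this
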